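-- pv_equiv track=rewrite | github.com/nad2520/python | chaines/ex3.py | masqueB
-- ===== SOURCE A (Python) =====
-- def masqueB(ip):
--     ch=ip.split("/")
--     cidr=int(ch[1])
--     masque=""
--     for i in range(cidr):
--         masque=masque+"1"
--     for j in range(cidr,32):
--         masque=masque+"0"
--     i=0
--     ch1=""
--     while i<32:
--         j=0
--         while j<8:
--             ch1=ch1+masque[i+j]
--             j=j+1
--         ch1=ch1+"."
--         i=i+8
--     return(ch1[:len(ch1)-1])
-- ===== SOURCE B (Python) =====
-- def masqueB(ip):
--     cidr = int(ip.split("/")[1])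
--     ones = min(max(cidr, 0), 32)
--     mask = ((1 << ones) - 1) << (32 - ones)
--     return ".".join(format((mask >> (24 - 8 * k)) & 0xFF, "08b") for k in range(4))
-- ===== Notes on version B (the rewrite author's own statement) =====
-- stated objective: simpler
-- what changed: B replaces A's character-by-character mask-string building and manual 8-char regrouping loops with integer bit arithmetic: it clamps the prefix to 0..32, builds the 32-bit mask ((1<<ones)-1)<<(32-ones), and formats each octet as an eight-bit binary string, dot-joined.
import Mathlib
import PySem

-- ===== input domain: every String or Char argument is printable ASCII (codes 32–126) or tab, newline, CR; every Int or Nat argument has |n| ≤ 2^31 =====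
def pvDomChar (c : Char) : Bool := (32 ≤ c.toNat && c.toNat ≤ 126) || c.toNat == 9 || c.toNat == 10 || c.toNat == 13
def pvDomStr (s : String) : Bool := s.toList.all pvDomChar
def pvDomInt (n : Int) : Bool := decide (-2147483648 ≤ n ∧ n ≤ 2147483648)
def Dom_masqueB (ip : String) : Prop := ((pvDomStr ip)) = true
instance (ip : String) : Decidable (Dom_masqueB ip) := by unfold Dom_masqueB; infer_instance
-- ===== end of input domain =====

-- B builds the netmask by integer bit arithmetic instead of A's 32-char string building
-- and regrouping loops (objective: simpler).

-- ===== PORT A =====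
-- the two mask-building for-loops of A
def pvMasqueChars (cidr : Int) : List Char :=
  let m1 := (PySem.List.pyRange 0 cidr 1).foldl (fun acc _ => acc ++ ['1']) ([] : List Char)
  (PySem.List.pyRange cidr 32 1).foldl (fun acc _ => acc ++ ['0']) m1

-- A's while-loops: i = 0,8,16,24; j = 0..7; ch1 += masque[i+j]; ch1 += dot
-- (masque[i+j] never raises here: masque always has ≥ 32 chars; getD '?' is unreachable)
def pvChGroup (masque : List Char) : List Char :=
  (PySem.List.pyRange 0 32 8).foldl (fun acc i =>
    ((PySem.List.pyRange 0 8 1).foldl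
      (fun acc2 j => acc2 ++ [(PySem.List.pyGet? masque (i + j)).getD '?']) acc) ++ ['.']) []

-- ch1[:len(ch1)-1] (drop the trailing dot)
def pvAfin (cidr : Int) : String :=
  let ch1 := pvChGroup (pvMasqueChars cidr)
  String.ofList (PySem.List.slice ch1 none (some ((ch1.length : Int) - 1)))

def masqueB (ip : String) : String :=
  match PySem.List.pyGet? (PySem.Chars.splitOn ip.toList ['/']) 1 with
  | none => ""          -- IndexError: excluded by Pre_
  | some s =>
    match PySem.Int.ofChars? s with
    | none => ""        -- ValueError: excluded by Pre_
    | some cidr => pvAfin cidr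

-- ===== PORT B =====
-- Python's format(o, eight-bit binary) for 0 ≤ o < 256: 8 bits, most significant first (exact on that range)
def pvBits8 (o : Nat) : List Char :=
  (List.range 8).map (fun i => if o.testBit (7 - i) then '1' else '0')

def pvBcore (ones : Nat) : List Char :=
  let mask := ((1 <<< ones) - 1) <<< (32 - ones)
  PySem.Chars.join ['.'] ((List.range 4).map (fun k => pvBits8 ((mask >>> (24 - 8 * k)) &&& 0xFF)))

def masqueB_alt (ip : String) : String :=
  match PySem.List.pyGet? (PySem.Chars.splitOn ip.toList ['/']) 1 with
  | none => ""
  | some s =>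
    match PySem.Int.ofChars? s with
    | none => ""
    | some cidr => String.ofList (pvBcore (min (max cidr 0) 32).toNat)

-- ===== PRECONDITION & SPEC =====
-- Pre_ excludes exactly the inputs where A raises: fewer than two slash-separated fields
-- (IndexError on ch[1]) or a second field that int() rejects (ValueError).
def Pre_masqueB (ip : String) : Prop :=
  2 ≤ (PySem.Chars.splitOn ip.toList ['/']).length ∧
  (PySem.Int.ofChars? ((PySem.Chars.splitOn ip.toList ['/']).getD 1 [])).isSome = true
instance (ip : String) : Decidable (Pre_masqueB ip) := by unfold Pre_masqueB; infer_instance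
def pvWitness_masqueB : String := "10.0.0.1/24"
def Spec_masqueB (ip : String) (out : String) : Prop := out = masqueB_alt ip
instance (ip : String) (out : String) : Decidable (Spec_masqueB ip out) := by unfold Spec_masqueB; infer_instance

-- ===== CLAIM (what is proved, stated in full; the proofs are below) =====
def Claim_equal_masqueB : Prop := ∀ (ip : String), Dom_masqueB ip → Pre_masqueB ip → Spec_masqueB ip (masqueB ip)

-- ===== LEMMAS AND PROOFS =====

-- the first 32 chars of A's masque, as a function of the clamped prefix
def pvPref (m : Nat) : List Char := List.replicate m '1' ++ List.replicate (32 - m) '0'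

lemma pvMasqueChars_eq (cidr : Int) :
    pvMasqueChars cidr =
      List.replicate cidr.toNat '1' ++ List.replicate (32 - cidr).toNat '0' := by
  unfold pvMasqueChars
  rw [PySem.List.foldl_append_singleton_eq_map, PySem.List.foldl_append_singleton_eq_map]
  simp [List.map_const', PySem.List.length_pyRange_one]

lemma pvMasqueChars_split (cidr : Int) :
    ∃ q, pvMasqueChars cidr = pvPref (min (max cidr 0) 32).toNat ++ q := by
  rw [pvMasqueChars_eq]
  unfold pvPref
  by_cases h0 : cidr ≤ 0
  · refine ⟨List.replicate ((32 - cidr).toNat - 32) '0', ?_⟩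
    have h1 : cidr.toNat = 0 := Int.toNat_of_nonpos h0
    have h2 : (min (max cidr 0) 32).toNat = 0 := by omega
    have h3 : (32 - cidr).toNat = 32 + ((32 - cidr).toNat - 32) := by omega
    rw [h1, h2, h3, List.replicate_add]
    simp
  · by_cases h32 : cidr ≤ 32
    · refine ⟨[], ?_⟩
      have h2 : (min (max cidr 0) 32).toNat = cidr.toNat := by omega
      have h3 : 32 - cidr.toNat = (32 - cidr).toNat := by omega
      rw [h2, ← h3, List.append_nil]
    · refine ⟨List.replicate (cidr.toNat - 32) '1', ?_⟩
      have h2 : (min (max cidr 0) 32).toNat = 32 := by omega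
      have h3 : (32 - cidr).toNat = 0 := by omega
      have h4 : cidr.toNat = 32 + (cidr.toNat - 32) := by omega
      rw [h2, h3, h4, List.replicate_add]
      simp

lemma pvGetAppend (p q : List Char) (hp : p.length = 32) (k : Int) (h0 : 0 ≤ k) (hk : k < 32) :
    PySem.List.pyGet? (p ++ q) k = PySem.List.pyGet? p k := by
  simp only [PySem.List.pyGet?, PySem.List.pyIdx?, List.length_append, hp]
  rw [if_pos h0, if_pos h0,
    if_pos (show k < ((32 + q.length : Nat) : Int) by push_cast; omega),
    if_pos (show k < ((32 : Nat) : Int) by exact_mod_cast hk)]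
  simp [List.getElem?_append_left (show k.toNat < p.length by omega)]

lemma pvChGroup_append (p q : List Char) (hp : p.length = 32) :
    pvChGroup (p ++ q) = pvChGroup p := by
  have hr1 : PySem.List.pyRange 0 32 8 = [0, 8, 16, 24] := by decide
  have hr2 : PySem.List.pyRange 0 8 1 = [0, 1, 2, 3, 4, 5, 6, 7] := by decide
  unfold pvChGroup
  rw [hr1, hr2]
  simp only [List.foldl_cons, List.foldl_nil]
  norm_num [pvGetAppend p q hp]

set_option maxHeartbeats 2000000 in
lemma pvKey : ∀ m : Nat, m < 33 →
    String.ofList (PySem.List.slice (pvChGroup (pvPref m)) none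
      (some (((pvChGroup (pvPref m)).length : Int) - 1))) = String.ofList (pvBcore m) := by
  decide

lemma pvPref_length (m : Nat) (hm : m ≤ 32) : (pvPref m).length = 32 := by
  simp [pvPref]; omega

lemma pvAfin_eq (cidr : Int) :
    pvAfin cidr = String.ofList (pvBcore (min (max cidr 0) 32).toNat) := by
  obtain ⟨q, hq⟩ := pvMasqueChars_split cidr
  have hm32 : (min (max cidr 0) 32).toNat ≤ 32 := by omega
  simp only [pvAfin]
  rw [hq, pvChGroup_append _ q (pvPref_length _ hm32)]
  exact pvKey _ (by omega)

-- ===== VERDICT (by name: the statement is the Claim_ definition above) =====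
theorem masqueB_spec : Claim_equal_masqueB := by
  intro ip _ _
  unfold Spec_masqueB masqueB masqueB_alt
  cases PySem.List.pyGet? (PySem.Chars.splitOn ip.toList ['/']) 1 with
  | none => rfl
  | some s =>
    show (match PySem.Int.ofChars? s with
          | none => ("" : String)
          | some cidr => pvAfin cidr)
       = (match PySem.Int.ofChars? s with
          | none => ("" : String)
          | some cidr => String.ofList (pvBcore (min (max cidr 0) 32).toNat))
    cases PySem.Int.ofChars? s with
    | none => rfl
    | some cidr => exact pvAfin_eq cidr
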